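-- pv_equiv track=rewrite | github.com/IAmQuince/tenThousand | tenk_core.py | series_histogram
-- ===== SOURCE A (Python) =====
-- from typing import Callable, Dict, List, Optional, Sequence, Tuple, Any, Set
-- import math
--
-- def series_histogram(data: List[int], bins: int = 30) -> Dict[str, Any]:
--     if not data:
--         return {"bins": [], "counts": []}
--     lo, hi = min(data), max(data)
--     if lo == hi:
--         return {"bins": [lo, hi + 1], "counts": [len(data)]}
--     # inclusive-ish histogram
--     width = max(1, int(math.ceil((hi - lo + 1) / bins)))
--     edges = list(range(lo, hi + width + 1, width))
--     counts = [0] * (len(edges) - 1)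
--     for x in data:
--         idx = min(len(edges) - 2, (x - lo) // width)
--         counts[idx] += 1
--     return {"bins": edges, "counts": counts}
-- ===== SOURCE B (Python) =====
-- import math
--
-- def _rank(s, v):
--     # number of elements of the sorted list s that are < v (binary search)
--     lo, hi = 0, len(s)
--     while lo < hi:
--         mid = (lo + hi) // 2
--         if s[mid] < v:
--             lo = mid + 1
--         else:
--             hi = mid
--     return lo
--
-- def series_histogram(data, bins=30):
--     if not data:
--         return {"bins": [], "counts": []}
--     lo, hi = min(data), max(data)
--     if lo == hi:
--         return {"bins": [lo, hi + 1], "counts": [len(data)]}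
--     width = max(1, int(math.ceil((hi - lo + 1) / bins)))
--     edges = list(range(lo, hi + width + 1, width))
--     # sort once, then each bin [a, b) is a rank difference in the sorted order
--     s = sorted(data)
--     counts = [_rank(s, b) - _rank(s, a) for a, b in zip(edges, edges[1:])]
--     return {"bins": edges, "counts": counts}
-- ===== Notes on version B (the rewrite author's own statement) =====
-- stated objective: alternative
-- what changed: Replaces A's per-element integer-division indexing into a mutable counts array with sort-plus-binary-search: B sorts the data once and obtains each bin's count as the difference of binary-search ranks at the bin's two edges.
import Mathlib
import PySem

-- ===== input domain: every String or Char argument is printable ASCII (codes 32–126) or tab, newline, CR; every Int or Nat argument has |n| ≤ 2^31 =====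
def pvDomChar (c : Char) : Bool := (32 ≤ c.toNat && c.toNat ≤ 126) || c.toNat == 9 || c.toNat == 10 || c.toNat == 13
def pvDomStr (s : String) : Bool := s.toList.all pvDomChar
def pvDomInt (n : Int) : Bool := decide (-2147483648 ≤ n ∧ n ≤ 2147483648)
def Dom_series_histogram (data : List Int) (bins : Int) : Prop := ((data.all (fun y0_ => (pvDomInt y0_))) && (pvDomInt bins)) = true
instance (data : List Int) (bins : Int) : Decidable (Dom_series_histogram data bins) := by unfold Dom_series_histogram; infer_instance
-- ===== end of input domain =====

-- B sorts the data once and computes each bin's count as a difference of binary-search ranks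
-- at consecutive edges — no mutable counts array, no per-element index arithmetic.

-- ===== PORT A =====
-- int(math.ceil((hi-lo+1)/bins)) is ported as the exact integer ceiling -((-(hi-lo+1)) // bins):
-- exact on Dom (|ints| ≤ 2^31, so the float quotient never rounds across an integer).
def series_histogram (data : List Int) (bins : Int) : List (String × List Int) :=
  if data = [] then [("bins", ([] : List Int)), ("counts", ([] : List Int))]
  else
    let lo := (PySem.List.min? data (fun x => x)).getD 0
    let hi := (PySem.List.max? data (fun x => x)).getD 0
    if lo = hi then [("bins", [lo, hi + 1]), ("counts", [(data.length : Int)])]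
    else
      let width := max 1 (-(PySem.Int.floordiv (-(hi - lo + 1)) bins))
      let edges := PySem.List.pyRange lo (hi + width + 1) width
      let counts :=
        data.foldl (fun c x =>
          let idx := min ((edges.length : Int) - 2) (PySem.Int.floordiv (x - lo) width)
          PySem.List.pySetD c idx (PySem.List.pyGetD c idx 0 + 1))
          (List.replicate (edges.length - 1) (0 : Int))
      [("bins", edges), ("counts", counts)]

-- ===== PORT B =====
-- _rank's while loop; s[mid] is ported with pyGetD (mid is always in range here, so the
-- default is never used); (lo+hi)//2 is PySem.Int.floordiv; terminates since lo ≤ mid < hi.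
def rankGo (s : List Int) (v lo hi : Int) : Int :=
  if h : lo < hi then
    let mid := PySem.Int.floordiv (lo + hi) 2
    if PySem.List.pyGetD s mid 0 < v then rankGo s v (mid + 1) hi
    else rankGo s v lo mid
  else lo
termination_by (hi - lo).toNat
decreasing_by
  · have := PySem.Int.floordiv_two_mid_bounds (le_of_lt h); omega
  · have h2 : PySem.Int.floordiv (lo + hi) 2 < hi :=
      (PySem.Int.floordiv_lt_iff_lt_mul (by norm_num)).2 (by omega)
    have := PySem.Int.floordiv_two_mid_bounds (le_of_lt h); omega

def rankB (s : List Int) (v : Int) : Int := rankGo s v 0 (s.length : Int)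

-- zip(edges, edges[1:]) is ported as zipWith over edges and edges.drop 1 (edges[1:] = drop 1)
def series_histogram_alt (data : List Int) (bins : Int) : List (String × List Int) :=
  if data = [] then [("bins", ([] : List Int)), ("counts", ([] : List Int))]
  else
    let lo := (PySem.List.min? data (fun x => x)).getD 0
    let hi := (PySem.List.max? data (fun x => x)).getD 0
    if lo = hi then [("bins", [lo, hi + 1]), ("counts", [(data.length : Int)])]
    else
      let width := max 1 (-(PySem.Int.floordiv (-(hi - lo + 1)) bins))
      let edges := PySem.List.pyRange lo (hi + width + 1) width
      let s := PySem.List.sorted data (fun x => x)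
      let counts := List.zipWith (fun a b => rankB s b - rankB s a) edges (edges.drop 1)
      [("bins", edges), ("counts", counts)]

-- ===== PRECONDITION & SPEC =====
-- Pre_ excludes only the inputs on which A raises ZeroDivisionError: bins = 0 reached with a
-- non-empty, non-constant data list (both early returns avoid the division).
def Pre_series_histogram (data : List Int) (bins : Int) : Prop :=
  data = [] ∨ (∀ x ∈ data, ∀ y ∈ data, x = y) ∨ bins ≠ 0
instance (data : List Int) (bins : Int) : Decidable (Pre_series_histogram data bins) := by
  unfold Pre_series_histogram; infer_instance
def pvWitness_series_histogram : List Int × Int := ([1, 5, 9], 3)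
def Spec_series_histogram (data : List Int) (bins : Int) (out : List (String × List Int)) : Prop := out = series_histogram_alt data bins
instance (data : List Int) (bins : Int) (out : List (String × List Int)) : Decidable (Spec_series_histogram data bins out) := by unfold Spec_series_histogram; infer_instance

-- ===== CLAIM (what is proved, stated in full; the proofs are below) =====
def Claim_equal_series_histogram : Prop := ∀ (data : List Int) (bins : Int), Dom_series_histogram data bins → Pre_series_histogram data bins → Spec_series_histogram data bins (series_histogram data bins)

-- ===== LEMMAS AND PROOFS =====

-- increment the k-th counter (what A's loop does, once the index is normalised to Nat)
def bumpN (c : List Int) (k : Nat) : List Int := c.set k (c.getD k 0 + 1)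

-- the bin index A assigns to x, as a Nat (nb = number of bins)
def ixN (lo width : Int) (nb : Nat) (x : Int) : Nat :=
  min (nb - 1) ((PySem.Int.floordiv (x - lo) width).toNat)

lemma fdiv_nonneg_of_le (lo width x : Int) (hw : 0 < width) (hx : lo ≤ x) :
    0 ≤ PySem.Int.floordiv (x - lo) width := by
  rw [PySem.Int.floordiv_eq_ediv_of_pos hw]; exact Int.ediv_nonneg (by omega) (by omega)

lemma length_bumpN (c : List Int) (j : Nat) : (bumpN c j).length = c.length :=
  List.length_set ..

lemma getD_bumpN (c : List Int) (j k : Nat) (hj : j < c.length) :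
    (bumpN c j).getD k 0 = c.getD k 0 + if j = k then 1 else 0 := by
  by_cases hjk : j = k
  · subst hjk
    simp [bumpN, List.getD_eq_getElem?_getD, List.getElem?_set_self hj,
      List.getElem?_eq_getElem hj]
  · simp [bumpN, List.getD_eq_getElem?_getD, List.getElem?_set_ne hjk, hjk]

lemma length_foldl_bump (f : Int → Nat) :
    ∀ (l : List Int) (c : List Int),
      (l.foldl (fun c x => bumpN c (f x)) c).length = c.length := by
  intro l
  induction l with
  | nil => intro c; rfl
  | cons x t ih => intro c; rw [List.foldl_cons, ih, length_bumpN]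

-- A's whole loop computes, at each position k, the count of elements mapped to bin k
lemma getD_foldl_bump (f : Int → Nat) :
    ∀ (l : List Int) (c : List Int) (k : Nat),
      (∀ x ∈ l, f x < c.length) →
      (l.foldl (fun c x => bumpN c (f x)) c).getD k 0
        = c.getD k 0 + ((l.countP (fun x => f x == k)) : Int) := by
  intro l
  induction l with
  | nil => intro c k _; simp
  | cons x t ih =>
    intro c k hf
    rw [List.foldl_cons, ih (bumpN c (f x)) k
      (fun y hy => (length_bumpN c (f x)) ▸ hf y (List.mem_cons_of_mem _ hy))]
    rw [getD_bumpN c (f x) k (hf x List.mem_cons_self), List.countP_cons]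
    by_cases hxk : f x = k
    · simp [hxk]; ring
    · simp [hxk]

lemma edges_facts (m M w : Int) (hw : 0 < w) (hmM : m < M) :
    2 ≤ (M + w + 1 - m + w - 1) / w ∧ M - m < ((M + w + 1 - m + w - 1) / w - 1) * w := by
  set a : Int := M + w + 1 - m + w - 1 with ha
  have h2 : (2 : Int) ≤ a / w := (Int.le_ediv_iff_mul_le hw).2 (by omega)
  have hmod := Int.emod_lt_of_pos a hw
  have heq := Int.mul_ediv_add_emod a w
  refine ⟨h2, ?_⟩
  have hlt : a - w < a / w * w := by rw [Int.mul_comm] at heq; omega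
  nlinarith

-- in a sorted list, the elements below v are exactly the first countP-many positions
lemma countP_lt_of_sorted (s : List Int) (hs : s.Pairwise (· ≤ ·)) (v : Int) :
    ∀ (i : Nat) (h : i < s.length),
      (i < s.countP (fun x => decide (x < v)) ↔ s[i] < v) := by
  intro i h
  have hmono : ∀ (a b : Nat) (ha : a < s.length) (hb : b < s.length), a ≤ b → s[a] ≤ s[b] := by
    intro a b ha hb hab
    rcases Nat.lt_or_ge a b with hlt | hge
    · exact List.pairwise_iff_getElem.1 hs a b ha hb hlt
    · have : a = b := by omega
      subst this; rfl
  constructor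
  · intro hc
    by_contra hge
    have hsplit := List.take_append_drop i s
    have hdz : (s.drop i).countP (fun x => decide (x < v)) = 0 := by
      rw [List.countP_eq_zero]
      intro x hx
      obtain ⟨j, hj, hxe⟩ := List.mem_iff_getElem.1 hx
      rw [List.getElem_drop] at hxe
      have hj2 : i + j < s.length := by have := hj; simp [List.length_drop] at this; omega
      have := hmono i (i + j) h hj2 (by omega)
      subst hxe; simp; omega
    have := List.countP_append (l₁ := s.take i) (l₂ := s.drop i)
      (p := fun x => decide (x < v))
    rw [hsplit] at this
    have hle := List.countP_le_length (l := s.take i) (p := fun x => decide (x < v))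
    rw [List.length_take] at hle
    omega
  · intro hv
    have hsplit := List.take_append_drop (i + 1) s
    have htf : (s.take (i + 1)).countP (fun x => decide (x < v)) = (s.take (i + 1)).length := by
      rw [List.countP_eq_length]
      intro x hx
      obtain ⟨j, hj, hxe⟩ := List.mem_iff_getElem.1 hx
      rw [List.getElem_take] at hxe
      have hjlen : j < s.length := by rw [List.length_take] at hj; omega
      have hji : j ≤ i := by rw [List.length_take] at hj; omega
      have := hmono j i hjlen h hji
      subst hxe; simp; omega
    have := List.countP_append (l₁ := s.take (i + 1)) (l₂ := s.drop (i + 1))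
      (p := fun x => decide (x < v))
    rw [hsplit] at this
    rw [List.length_take] at htf
    omega

-- the binary search returns r whenever r is pinned by the invariant and lies in [lo, hi]
lemma rankGo_eq (s : List Int) (v : Int) (r : Int)
    (hlt : ∀ (i : Nat) (h : i < s.length), (i : Int) < r → s[i] < v)
    (hge : ∀ (i : Nat) (h : i < s.length), r ≤ (i : Int) → ¬ s[i] < v) :
    ∀ (n : Nat) (lo hi : Int), (hi - lo).toNat ≤ n → 0 ≤ lo → hi ≤ (s.length : Int) →
      lo ≤ r → r ≤ hi → rankGo s v lo hi = r := by
  intro n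
  induction n with
  | zero =>
    intro lo hi hn _ _ hlr hrh
    rw [rankGo]
    rw [dif_neg (by omega)]
    omega
  | succ n ih =>
    intro lo hi hn h0 hlen hlr hrh
    rw [rankGo]
    by_cases h : lo < hi
    · rw [dif_pos h]
      obtain ⟨hm1, hm2⟩ := PySem.Int.floordiv_two_mid_bounds (le_of_lt h)
      have hmlt : PySem.Int.floordiv (lo + hi) 2 < hi :=
        (PySem.Int.floordiv_lt_iff_lt_mul (by norm_num)).2 (by omega)
      simp only [] at *
      set mid := PySem.Int.floordiv (lo + hi) 2 with hmid
      have hmrange : mid.toNat < s.length := by omega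
      have hget : PySem.List.pyGetD s mid 0 = s[mid.toNat] := by
        rw [PySem.List.pyGetD_of_nonneg s 0 (by omega), List.getD_eq_getElem?_getD,
          List.getElem?_eq_getElem hmrange]
        rfl
      simp only [hget]
      by_cases hv : s[mid.toNat] < v
      · rw [if_pos hv]
        have hmr : mid < r := by
          by_contra hc
          exact hge mid.toNat hmrange (by omega) hv
        exact ih (mid + 1) hi (by omega) (by omega) hlen (by omega) hrh
      · rw [if_neg hv]
        have hrm : r ≤ mid := by
          by_contra hc
          exact hv (hlt mid.toNat hmrange (by omega))
        exact ih lo mid (by omega) h0 (by omega) hlr hrm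
    · rw [dif_neg h]; omega

-- _rank on a sorted list counts the elements below v
lemma rankB_spec (s : List Int) (hs : s.Pairwise (· ≤ ·)) (v : Int) :
    rankB s v = ((s.countP (fun x => decide (x < v)) : Nat) : Int) := by
  have hcle := List.countP_le_length (l := s) (p := fun x => decide (x < v))
  unfold rankB
  exact rankGo_eq s v ((s.countP (fun x => decide (x < v)) : Nat) : Int)
    (fun i h hi => (countP_lt_of_sorted s hs v i h).1 (by omega))
    (fun i h hi hv => by
      have := (countP_lt_of_sorted s hs v i h).2 hv
      omega)
    s.length 0 (s.length : Int) (by omega) (by omega) (by omega) (by omega) (by omega)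

-- counting below b splits at any a ≤ b into "below a" plus "in [a, b)"
lemma countP_lt_split (l : List Int) (a b : Int) (hab : a ≤ b) :
    l.countP (fun x => decide (x < b))
      = l.countP (fun x => decide (x < a))
        + l.countP (fun x => decide (a ≤ x) && decide (x < b)) := by
  induction l with
  | nil => simp
  | cons x t ih =>
    simp only [List.countP_cons, ih]
    by_cases h1 : x < a
    · have h2 : x < b := lt_of_lt_of_le h1 hab
      simp [h1, h2, not_le.2 h1]
      omega
    · by_cases h2 : x < b
      · simp [h1, h2, not_lt.1 h1]
        omega
      · simp [h1, h2]

-- ===== VERDICT (by name: the statement is the Claim_ definition above) =====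
theorem series_histogram_spec : Claim_equal_series_histogram := by
  intro data bins _hdom _hpre
  unfold Spec_series_histogram series_histogram series_histogram_alt
  by_cases hd : data = []
  · simp [hd]
  · obtain ⟨m, hmin⟩ : ∃ m, PySem.List.min? data (fun x => x) = some m := by
      cases h : PySem.List.min? data (fun x => x) with
      | none => exact absurd ((PySem.List.min?_eq_none_iff _ _).1 h) hd
      | some m => exact ⟨m, rfl⟩
    obtain ⟨M, hmax⟩ : ∃ M, PySem.List.max? data (fun x => x) = some M := by
      cases h : PySem.List.max? data (fun x => x) with
      | none => exact absurd ((PySem.List.max?_eq_none_iff _ _).1 h) hd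
      | some M => exact ⟨M, rfl⟩
    simp only [if_neg hd, hmin, hmax, Option.getD_some]
    by_cases he : m = M
    · simp [he]
    · simp only [if_neg he]
      have hlo : ∀ x ∈ data, m ≤ x := fun x hx => PySem.List.min?_isMin hmin x hx
      have hhi : ∀ x ∈ data, x ≤ M := fun x hx => PySem.List.max?_isMax hmax x hx
      have hmM : m < M := lt_of_le_of_ne (hlo M (PySem.List.max?_mem hmax)) he
      set w : Int := max 1 (-(PySem.Int.floordiv (-(M - m + 1)) bins)) with hwdef
      have hw : 0 < w := by
        have := le_max_left (1 : Int) (-(PySem.Int.floordiv (-(M - m + 1)) bins)); omega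
      obtain ⟨hN2', hNub'⟩ := edges_facts m M w hw hmM
      set N : Nat := ((M + w + 1 - m + w - 1) / w).toNat with hNdef
      have hN2 : 2 ≤ (N : Int) := by omega
      have hNub : M - m < ((N : Int) - 1) * w := by
        have hNc : (N : Int) = (M + w + 1 - m + w - 1) / w := by omega
        rw [hNc]; exact hNub'
      have hedges : PySem.List.pyRange m (M + w + 1) w
          = (List.range N).map (fun k : Nat => m + w * (k : Int)) := by
        rw [PySem.List.pyRange_of_pos _ _ hw, if_pos (by omega), hNdef]
      set edges := PySem.List.pyRange m (M + w + 1) w with hedef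
      have hL : edges.length = N := by rw [hedges]; simp
      -- each element's A-index, as an uncapped Nat (the cap never binds: last edge exceeds M)
      have hix : ∀ x ∈ data, ∀ k : Nat,
          (ixN m w (N - 1) x = k ↔ (m + w * (k : Int) ≤ x ∧ x < m + w * ((k : Int) + 1))) := by
        intro x hx k
        have hxl := hlo x hx
        have hxh := hhi x hx
        have hq0 := fdiv_nonneg_of_le m w x hw hxl
        have hqub : PySem.Int.floordiv (x - m) w < (N : Int) - 1 := by
          rw [PySem.Int.floordiv_eq_ediv_of_pos hw]
          have h1 : (x - m) / w * w ≤ x - m := Int.ediv_mul_le _ (by omega)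
          have h2 : x - m < ((N : Int) - 1) * w := by omega
          nlinarith [Int.ediv_nonneg (show (0:Int) ≤ x - m by omega) (le_of_lt hw)]
        have hcap : ixN m w (N - 1) x = (PySem.Int.floordiv (x - m) w).toNat := by
          unfold ixN; omega
        rw [hcap]
        rw [show ((PySem.Int.floordiv (x - m) w).toNat = k)
            ↔ (PySem.Int.floordiv (x - m) w = (k : Int)) from by omega]
        rw [PySem.Int.floordiv_eq_iff_of_pos hw]
        constructor
        · rintro ⟨h1, h2⟩; constructor <;> nlinarith
        · rintro ⟨h1, h2⟩; constructor <;> nlinarith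
      -- normalise A's loop body to bumpN at the Nat index ixN
      have hA : data.foldl (fun c x =>
            let idx := min ((edges.length : Int) - 2) (PySem.Int.floordiv (x - m) w)
            PySem.List.pySetD c idx (PySem.List.pyGetD c idx 0 + 1))
            (List.replicate (edges.length - 1) (0 : Int))
          = data.foldl (fun c x => bumpN c (ixN m w (N - 1) x))
            (List.replicate (N - 1) (0 : Int)) := by
        rw [hL]
        apply PySem.List.foldl_congr_mem
        intro c x hx
        have hq0 := fdiv_nonneg_of_le m w x hw (hlo x hx)
        have hidx : min ((N : Int) - 2) (PySem.Int.floordiv (x - m) w)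
            = ((ixN m w (N - 1) x : Nat) : Int) := by unfold ixN; omega
        simp only [hidx, PySem.List.pySetD_natCast, PySem.List.pyGetD_natCast]
        rfl
      set cntA := data.foldl (fun c x => bumpN c (ixN m w (N - 1) x))
        (List.replicate (N - 1) (0 : Int)) with hcA
      have hixlt : ∀ x ∈ data, ixN m w (N - 1) x < (List.replicate (N - 1) (0 : Int)).length := by
        intro x hx
        rw [List.length_replicate]
        unfold ixN; omega
      have hlenA : cntA.length = N - 1 := by
        rw [hcA, length_foldl_bump, List.length_replicate]
      set sN := PySem.List.sorted data (fun x => x) with hsN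
      have hsp : sN.Pairwise (· ≤ ·) := PySem.List.sorted_pairwise data (fun x => x)
      have hperm : sN.Perm data := PySem.List.sorted_perm data (fun x => x) false
      have hlenB : (List.zipWith (fun a b => rankB sN b - rankB sN a)
          edges (edges.drop 1)).length = N - 1 := by
        simp [hL]
      simp only [List.cons.injEq, Prod.mk.injEq, and_true, true_and]
      rw [hA]
      apply List.ext_getElem (by rw [hlenA, hlenB])
      intro k hk1 hk2
      have hkN : k < N - 1 := by omega
      have hEk : ∀ j : Nat, (hj : j < N) → edges[j]'(by omega) = m + w * (j : Int) := by
        intro j hj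
        simp only [hedges, List.getElem_map, List.getElem_range]
      have hab : m + w * (k : Int) ≤ m + w * ((k : Int) + 1) := by
        have hws : w * ((k : Int) + 1) = w * (k : Int) + w := by ring
        linarith
      have hgB : (List.zipWith (fun a b => rankB sN b - rankB sN a)
          edges (edges.drop 1))[k]'hk2
          = rankB sN (m + w * ((k : Int) + 1)) - rankB sN (m + w * (k : Int)) := by
        rw [List.getElem_zipWith, List.getElem_drop, hEk k (by omega), hEk (1 + k) (by omega)]
        have hc : m + w * ((1 + k : Nat) : Int) = m + w * ((k : Int) + 1) := by
          push_cast; ring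
        rw [hc]
      rw [hgB]
      have hgA : cntA[k]'hk1 = ((data.countP (fun x => ixN m w (N - 1) x == k) : Nat) : Int) := by
        have := getD_foldl_bump (ixN m w (N - 1)) data (List.replicate (N - 1) (0 : Int)) k hixlt
        rw [← hcA] at this
        rw [List.getD_eq_getElem?_getD, List.getElem?_eq_getElem hk1] at this
        simpa using this
      rw [hgA]
      rw [rankB_spec sN hsp (m + w * ((k : Int) + 1)), rankB_spec sN hsp (m + w * (k : Int))]
      rw [List.Perm.countP_eq _ hperm, List.Perm.countP_eq _ hperm]
      have hsplit := countP_lt_split data (m + w * (k : Int)) (m + w * ((k : Int) + 1)) hab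
      have hcongr : data.countP (fun x => ixN m w (N - 1) x == k)
          = data.countP (fun x =>
              decide (m + w * (k : Int) ≤ x) && decide (x < m + w * ((k : Int) + 1))) := by
        apply List.countP_congr
        intro x hx
        simp only [beq_iff_eq, Bool.and_eq_true, decide_eq_true_eq]
        exact hix x hx k
      rw [hcongr]
      omega
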